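-- pv_equiv track=rewrite | github.com/cratpij/logslice | logslice/truncate.py | truncate_fields
-- ===== SOURCE A (Python) =====
-- from typing import Any, Dict, List, Optional
--
-- Record = Dict[str, Any]
--
-- def truncate_field(
--     record: Record,
--     field: str,
--     max_length: int,
--     suffix: str = "...",
-- ) -> Record:
--     """Return a new record with the given field truncated to max_length characters.
--
--     If the field value is not a string or is shorter than max_length, the record
--     is returned unchanged (still a shallow copy).
--     """
--     result = dict(record)
--     value = result.get(field)
--     if isinstance(value, str) and len(value) > max_length:
--         cut = max(0, max_length - len(suffix))
--         result[field] = value[:cut] + suffix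
--     return result
--
-- def truncate_fields(
--     record: Record,
--     fields: List[str],
--     max_length: int,
--     suffix: str = "...",
-- ) -> Record:
--     """Truncate multiple fields in a single record."""
--     result = dict(record)
--     for field in fields:
--         result = truncate_field(result, field, max_length, suffix)
--     return result
-- ===== SOURCE B (Python) =====
-- def truncate_fields(record, fields, max_length, suffix="..."):
--     """Truncate multiple fields in a single record (single pass over the record)."""
--     fieldset = set(fields)
--     cut = max(0, max_length - len(suffix))
--     return {
--         k: (v[:cut] + suffix)
--         if (k in fieldset and isinstance(v, str) and len(v) > max_length)
--         else v
--         for k, v in record.items()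
--     }
-- ===== Notes on version B (the rewrite author's own statement) =====
-- stated objective: faster
-- what changed: Replaced the per-field helper and the loop of repeated full-dict copies/updates over `fields` with one dict comprehension over the record's items, deciding truncation by membership in a set built once from `fields`.
import Mathlib
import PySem

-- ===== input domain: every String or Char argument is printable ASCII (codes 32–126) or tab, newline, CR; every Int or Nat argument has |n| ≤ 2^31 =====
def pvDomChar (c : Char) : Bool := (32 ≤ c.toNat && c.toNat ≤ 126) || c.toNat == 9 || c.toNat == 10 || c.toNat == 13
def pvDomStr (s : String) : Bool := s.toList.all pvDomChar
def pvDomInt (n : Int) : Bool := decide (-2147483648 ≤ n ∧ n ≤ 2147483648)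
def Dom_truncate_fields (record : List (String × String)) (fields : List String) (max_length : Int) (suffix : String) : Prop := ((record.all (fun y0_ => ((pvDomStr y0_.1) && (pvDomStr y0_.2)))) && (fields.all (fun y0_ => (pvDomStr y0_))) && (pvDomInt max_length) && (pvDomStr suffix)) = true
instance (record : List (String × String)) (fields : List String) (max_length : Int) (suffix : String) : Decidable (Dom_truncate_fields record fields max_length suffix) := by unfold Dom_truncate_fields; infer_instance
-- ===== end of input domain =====

-- B replaces A's loop of per-field dict copies/updates by a single pass over the record's
-- items with a set of field names built once (idiomatic dict comprehension); return values only.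

-- ===== PORT A =====
-- helper: port of truncate_field (the isinstance(value, str) test is always true here,
-- since every value has type String under the type convention)
def pvTruncField (record : PySem.Dict String String) (field : String) (max_length : Int) (suffix : String) : PySem.Dict String String :=
  let result := record
  match result.get? field with
  | some value =>
      if max_length < (PySem.Str.len value : Int) then
        let cut : Int := max 0 (max_length - (PySem.Str.len suffix : Int))
        result.insert field (String.ofList (PySem.List.slice value.toList none (some cut) ++ suffix.toList))
      else result
  | none => result

def truncate_fields (record : List (String × String)) (fields : List String) (max_length : Int) (suffix : String) : List (String × String) :=
  (fields.foldl (fun result field => pvTruncField result field max_length suffix) (PySem.Dict.ofList record)).items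

-- ===== PORT B =====
def truncate_fields_alt (record : List (String × String)) (fields : List String) (max_length : Int) (suffix : String) : List (String × String) :=
  let fieldset : PySem.Set String := PySem.Set.ofList fields
  let cut : Int := max 0 (max_length - (PySem.Str.len suffix : Int))
  (PySem.Dict.ofList record).items.map (fun kv =>
    if PySem.Set.contains fieldset kv.1 && decide (max_length < (PySem.Str.len kv.2 : Int)) then
      (kv.1, String.ofList (PySem.List.slice kv.2.toList none (some cut) ++ suffix.toList))
    else kv)

-- ===== PRECONDITION & SPEC =====
def Spec_truncate_fields (record : List (String × String)) (fields : List String) (max_length : Int) (suffix : String) (out : List (String × String)) : Prop := out = truncate_fields_alt record fields max_length suffix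
instance (record : List (String × String)) (fields : List String) (max_length : Int) (suffix : String) (out : List (String × String)) : Decidable (Spec_truncate_fields record fields max_length suffix out) := by unfold Spec_truncate_fields; infer_instance

-- ===== CLAIM (what is proved, stated in full; the proofs are below) =====
def Claim_equal_truncate_fields : Prop := ∀ (record : List (String × String)) (fields : List String) (max_length : Int) (suffix : String), Dom_truncate_fields record fields max_length suffix → Spec_truncate_fields record fields max_length suffix (truncate_fields record fields max_length suffix)

-- ===== LEMMAS AND PROOFS =====

-- the truncated value of A's (and B's) single-field update
def pvCut (value : String) (max_length : Int) (suffix : String) : String :=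
  String.ofList (PySem.List.slice value.toList none (some (max 0 (max_length - (PySem.Str.len suffix : Int)))) ++ suffix.toList)

-- what one pass of truncate_field does to a single item
def pvG (field : String) (max_length : Int) (suffix : String) (kv : String × String) : String × String :=
  if kv.1 = field ∧ max_length < (PySem.Str.len kv.2 : Int) then (kv.1, pvCut kv.2 max_length suffix) else kv

-- what the whole of A does to a single item
def pvM (fields : List String) (max_length : Int) (suffix : String) (kv : String × String) : String × String :=
  if kv.1 ∈ fields ∧ max_length < (PySem.Str.len kv.2 : Int) then (kv.1, pvCut kv.2 max_length suffix) else kv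

lemma pvG_fst (field : String) (m : Int) (s : String) (kv : String × String) :
    (pvG field m s kv).1 = kv.1 := by
  unfold pvG; split_ifs <;> rfl

lemma toList_pvCut (v : String) (m : Int) (s : String) :
    (pvCut v m s).toList = v.toList.take (max 0 (m - (s.toList.length : Int))).toNat ++ s.toList := by
  simp [pvCut, PySem.Str.len_eq, PySem.List.slice_to (xs := v.toList) (le_max_left 0 _)]

lemma len_pvCut (v : String) (m : Int) (s : String) :
    (PySem.Str.len (pvCut v m s) : Int)
      = (min (max 0 (m - (s.toList.length : Int))).toNat v.toList.length : Int) + s.toList.length := by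
  rw [PySem.Str.len_eq]
  simp [toList_pvCut]

-- truncation is idempotent: re-truncating an already-truncated value changes nothing
lemma pvCut_idem (v : String) (m : Int) (s : String)
    (h : m < (PySem.Str.len (pvCut v m s) : Int)) :
    pvCut (pvCut v m s) m s = pvCut v m s := by
  rw [len_pvCut] at h
  have hcut0 : (max 0 (m - (s.toList.length : Int))) = 0 := by omega
  have hs : PySem.Str.len s = (s.toList.length : Int) := by rw [PySem.Str.len_eq]
  unfold pvCut
  rw [hs, hcut0]
  rw [PySem.List.slice_to _ le_rfl, PySem.List.slice_to _ le_rfl]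
  simp

lemma pvM_pvG (field : String) (rest : List String) (m : Int) (s : String) (kv : String × String) :
    pvM rest m s (pvG field m s kv) = pvM (field :: rest) m s kv := by
  by_cases h1 : kv.1 = field ∧ m < (PySem.Str.len kv.2 : Int)
  · have hx : pvG field m s kv = (kv.1, pvCut kv.2 m s) := by
      simp only [pvG, if_pos h1]
    have hr : pvM (field :: rest) m s kv = (kv.1, pvCut kv.2 m s) := by
      simp only [pvM, if_pos (And.intro (List.mem_cons.mpr (Or.inl h1.1)) h1.2)]
    rw [hx, hr]
    simp only [pvM]
    by_cases h3 : (kv.1, pvCut kv.2 m s).1 ∈ rest ∧ m < (PySem.Str.len (kv.1, pvCut kv.2 m s).2 : Int)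
    · rw [if_pos h3]
      exact Prod.ext rfl (pvCut_idem kv.2 m s h3.2)
    · rw [if_neg h3]
  · have hx : pvG field m s kv = kv := by simp only [pvG, if_neg h1]
    rw [hx]
    simp only [pvM]
    by_cases h2 : kv.1 ∈ rest ∧ m < (PySem.Str.len kv.2 : Int)
    · rw [if_pos h2, if_pos (And.intro (List.mem_cons.mpr (Or.inr h2.1)) h2.2)]
    · rw [if_neg h2,
        if_neg (fun hh => h2 (And.intro ((List.mem_cons.mp hh.1).resolve_left (fun he => h1 (And.intro he hh.2))) hh.2))]

lemma items_pvTruncField (d : PySem.Dict String String) (f : String) (m : Int) (s : String)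
    (h : d.keys.Nodup) :
    (pvTruncField d f m s).items = d.items.map (pvG f m s) := by
  unfold pvTruncField
  cases hget : d.get? f with
  | none =>
    have hnk : f ∉ d.keys := by
      rw [← PySem.Dict.get?_eq_none_iff_not_mem_keys]; exact hget
    have hid : d.items.map (pvG f m s) = d.items := by
      have h1 : d.items.map (pvG f m s) = d.items.map id :=
        List.map_congr_left (fun kv hkv => by
          have hne : kv.1 ≠ f := fun he => hnk (he ▸ PySem.Dict.mem_keys_of_mem_items d hkv)
          simp [pvG, hne])
      rw [h1, List.map_id]
    simp only [hget]
    exact hid.symm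
  | some v =>
    have hc : d.contains f = true := by
      rw [PySem.Dict.contains_eq_isSome_get?, hget]; rfl
    simp only [hget]
    by_cases hv : m < (PySem.Str.len v : Int)
    · rw [if_pos hv, PySem.Dict.items_insert_of_contains _ _ hc]
      apply List.map_congr_left
      intro kv hkv
      by_cases hp : kv.1 = f
      · have hg : d.get? kv.1 = some kv.2 := PySem.Dict.get?_of_mem_items d hkv h
        have hv2 : kv.2 = v := by
          rw [hp, hget] at hg; exact (Option.some.inj hg).symm
        have hb : (kv.1 == f) = true := beq_iff_eq.mpr hp
        rw [if_pos hb]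
        simp only [pvG, hv2]
        rw [if_pos (And.intro hp hv), hp]
        rfl
      · have hb : (kv.1 == f) = false := beq_false_of_ne hp
        rw [if_neg (by simp [hb])]
        simp [pvG, hp]
    · rw [if_neg hv]
      have h1 : d.items.map (pvG f m s) = d.items.map id :=
        List.map_congr_left (fun kv hkv => by
          by_cases hp : kv.1 = f
          · have hg : d.get? kv.1 = some kv.2 := PySem.Dict.get?_of_mem_items d hkv h
            have hv2 : kv.2 = v := by
              rw [hp, hget] at hg; exact (Option.some.inj hg).symm
            have hne : ¬ (kv.1 = f ∧ m < (PySem.Str.len kv.2 : Int)) := fun hh => hv (hv2 ▸ hh.2)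
            simp only [pvG, if_neg hne, id_eq]
          · simp [pvG, hp])
      rw [h1, List.map_id]

lemma keys_pvTruncField (d : PySem.Dict String String) (f : String) (m : Int) (s : String)
    (h : d.keys.Nodup) :
    (pvTruncField d f m s).keys = d.keys := by
  simp only [PySem.Dict.keys, items_pvTruncField d f m s h, List.map_map]
  exact List.map_congr_left (fun kv _ => pvG_fst f m s kv)

lemma items_fold (fields : List String) (d : PySem.Dict String String) (m : Int) (s : String)
    (h : d.keys.Nodup) :
    (fields.foldl (fun r f => pvTruncField r f m s) d).items = d.items.map (pvM fields m s) := by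
  induction fields generalizing d with
  | nil =>
    rw [List.foldl_nil, List.map_congr_left (g := id) (fun kv _ => by simp [pvM]), List.map_id]
  | cons f rest ih =>
    rw [List.foldl_cons,
      ih (pvTruncField d f m s) (by rw [keys_pvTruncField d f m s h]; exact h),
      items_pvTruncField d f m s h, List.map_map]
    exact List.map_congr_left (fun kv _ => pvM_pvG f rest m s kv)

-- ===== VERDICT (by name: the statement is the Claim_ definition above) =====
theorem truncate_fields_spec : Claim_equal_truncate_fields := by
  intro record fields m s _
  unfold Spec_truncate_fields truncate_fields truncate_fields_alt
  rw [items_fold fields _ m s (PySem.Dict.nodup_keys_ofList record)]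
  apply List.map_congr_left
  intro kv _
  by_cases hmem : kv.1 ∈ fields
  · by_cases hlen : m < (PySem.Str.len kv.2 : Int)
    · have hlen' : m < (kv.2.length : Int) := by simpa using hlen
      simp [pvM, pvCut, hmem, hlen', PySem.Set.contains, PySem.Set.mem_ofList]
    · have hlen' : ¬ m < (kv.2.length : Int) := by simpa using hlen
      simp [pvM, hmem, hlen', PySem.Set.contains, PySem.Set.mem_ofList]
  · simp [pvM, hmem, PySem.Set.contains, PySem.Set.mem_ofList]
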